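-- pv_equiv track=rewrite | github.com/mitchelhaan/advent-of-code | year2015/day03/main.py | part2
-- ===== SOURCE A (Python) =====
-- def part2(directions: str) -> int:
--     santa_pos = (0, 0)
--     robot_pos = (0, 0)
--
--     visited = set([santa_pos])
--
--     for i, d in enumerate(directions):
--         if i % 2:
--             pos = santa_pos
--         else:
--             pos = robot_pos
--
--         if d == "<":
--             pos = (pos[0] - 1, pos[1])
--         elif d == ">":
--             pos = (pos[0] + 1, pos[1])
--         elif d == "v":
--             pos = (pos[0], pos[1] - 1)
--         elif d == "^":
--             pos = (pos[0], pos[1] + 1)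
--
--         if i % 2:
--             santa_pos = pos
--         else:
--             robot_pos = pos
--
--         visited.add(pos)
--
--     return len(visited)
-- ===== SOURCE B (Python) =====
-- def part2(directions: str) -> int:
--     visited = {(0, 0)}
--     # even-index moves drive the robot, odd-index moves drive santa;
--     # each agent is walked independently from the origin.
--     for moves in (directions[0::2], directions[1::2]):
--         x = y = 0
--         for d in moves:
--             if d == "<":
--                 x -= 1
--             elif d == ">":
--                 x += 1
--             elif d == "v":
--                 y -= 1
--             elif d == "^":
--                 y += 1
--             visited.add((x, y))
--     return len(visited)
-- ===== Notes on version B (the rewrite author's own statement) =====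
-- stated objective: alternative
-- what changed: Instead of one loop that alternates agents via i % 2 with two carried positions, B deinterleaves the string into even-index (robot) and odd-index (santa) moves and walks each half independently from the origin into a shared visited set.
import Mathlib
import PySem

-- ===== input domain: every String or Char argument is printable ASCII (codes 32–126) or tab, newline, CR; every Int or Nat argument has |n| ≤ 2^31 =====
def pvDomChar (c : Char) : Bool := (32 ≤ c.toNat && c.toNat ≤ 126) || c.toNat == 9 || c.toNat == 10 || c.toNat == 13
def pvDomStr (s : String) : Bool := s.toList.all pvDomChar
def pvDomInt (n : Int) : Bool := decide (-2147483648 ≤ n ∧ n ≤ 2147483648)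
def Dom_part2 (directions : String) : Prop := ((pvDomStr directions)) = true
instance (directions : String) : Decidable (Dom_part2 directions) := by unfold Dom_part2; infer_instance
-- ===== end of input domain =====

-- B deinterleaves the string into even-index (robot) and odd-index (santa) halves and walks
-- each half in its own pass from the origin, instead of A's single loop alternating via i % 2.

-- ===== PORT A =====
-- A's loop 'for i, d in enumerate(directions)' carrying santa_pos, robot_pos, visited.
def part2loop (cs : List Char) (i : Nat) (santa robot : Int × Int)
    (visited : PySem.Set (Int × Int)) : PySem.Set (Int × Int) :=
  match cs with
  | [] => visited
  | d :: rest =>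
    let pos := if i % 2 == 1 then santa else robot
    let pos := if d == '<' then (pos.1 - 1, pos.2)
      else if d == '>' then (pos.1 + 1, pos.2)
      else if d == 'v' then (pos.1, pos.2 - 1)
      else if d == '^' then (pos.1, pos.2 + 1)
      else pos
    let santa := if i % 2 == 1 then pos else santa
    let robot := if i % 2 == 1 then robot else pos
    part2loop rest (i + 1) santa robot (PySem.Set.add visited pos)

def part2 (directions : String) : Int :=
  PySem.Set.len
    (part2loop directions.toList 0 ((0 : Int), (0 : Int)) ((0 : Int), (0 : Int))
      (PySem.Set.ofList [((0 : Int), (0 : Int))]))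

-- ===== PORT B =====
-- B's inner loop: walk one list of moves from (0, 0), adding each position to visited.
def part2walk (moves : List Char) (x y : Int)
    (visited : PySem.Set (Int × Int)) : PySem.Set (Int × Int) :=
  match moves with
  | [] => visited
  | d :: rest =>
    let x := if d == '<' then x - 1 else if d == '>' then x + 1 else x
    let y := if d == 'v' then y - 1 else if d == '^' then y + 1 else y
    part2walk rest x y (PySem.Set.add visited (x, y))

def part2_alt (directions : String) : Int :=
  let visited := PySem.Set.ofList [((0 : Int), (0 : Int))]
  -- directions[0::2] and directions[1::2]; the step is the literal 2 ≠ 0, so the slice never raises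
  let visited := part2walk ((PySem.Str.slice? directions (some 0) none 2).getD "").toList 0 0 visited
  let visited := part2walk ((PySem.Str.slice? directions (some 1) none 2).getD "").toList 0 0 visited
  PySem.Set.len visited

-- ===== PRECONDITION & SPEC =====
def Spec_part2 (directions : String) (out : Int) : Prop := out = part2_alt directions
instance (directions : String) (out : Int) : Decidable (Spec_part2 directions out) := by unfold Spec_part2; infer_instance

-- ===== CLAIM (what is proved, stated in full; the proofs are below) =====
def Claim_equal_part2 : Prop := ∀ (directions : String), Dom_part2 directions → Spec_part2 directions (part2 directions)

-- ===== LEMMAS AND PROOFS =====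

-- the single-step move, as a pair of independent component updates
def pvMv (x y : Int) (d : Char) : Int × Int :=
  (if d == '<' then x - 1 else if d == '>' then x + 1 else x,
   if d == 'v' then y - 1 else if d == '^' then y + 1 else y)

-- positions visited while walking cs from p
def pvTrace (p : Int × Int) : List Char → List (Int × Int)
  | [] => []
  | c :: r => pvMv p.1 p.2 c :: pvTrace (pvMv p.1 p.2 c) r

-- elements at even / odd positions
def pvEv {α : Type} : List α → List α
  | [] => []
  | [x] => [x]
  | x :: _ :: r => x :: pvEv r

def pvOd {α : Type} : List α → List α
  | [] => []
  | _ :: r => pvEv r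

theorem pvEv_cons {α : Type} (x : α) (xs : List α) : pvEv (x :: xs) = x :: pvOd xs := by
  cases xs <;> rfl

-- A's if/elif chain on a pair equals pvMv
theorem pvChain_eq (p : Int × Int) (d : Char) :
    (if d == '<' then (p.1 - 1, p.2)
      else if d == '>' then (p.1 + 1, p.2)
      else if d == 'v' then (p.1, p.2 - 1)
      else if d == '^' then (p.1, p.2 + 1)
      else p) = pvMv p.1 p.2 d := by
  simp only [pvMv]
  split_ifs with h1 h2 h3 h4 <;> simp_all

theorem part2walk_mem (moves : List Char) :
    ∀ (x y : Int) (v : PySem.Set (Int × Int)) (q : Int × Int),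
      q ∈ part2walk moves x y v ↔ q ∈ v ∨ q ∈ pvTrace (x, y) moves := by
  induction moves with
  | nil => intro x y v q; simp [part2walk, pvTrace]
  | cons d rest ih =>
    intro x y v q
    simp only [part2walk, ih, PySem.Set.mem_add, pvTrace, List.mem_cons]
    tauto

theorem part2walk_nodup (moves : List Char) :
    ∀ (x y : Int) (v : PySem.Set (Int × Int)), v.Nodup → (part2walk moves x y v).Nodup := by
  induction moves with
  | nil => intro x y v h; exact h
  | cons d rest ih => intro x y v h; exact ih _ _ _ (PySem.Set.nodup_add _ _ h)

theorem part2loop_mem (cs : List Char) :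
    ∀ (i : Nat) (s r : Int × Int) (v : PySem.Set (Int × Int)) (q : Int × Int),
      q ∈ part2loop cs i s r v ↔ q ∈ v ∨
        (if i % 2 = 1 then q ∈ pvTrace s (pvEv cs) ∨ q ∈ pvTrace r (pvOd cs)
         else q ∈ pvTrace r (pvEv cs) ∨ q ∈ pvTrace s (pvOd cs)) := by
  induction cs with
  | nil => intro i s r v q; simp [part2loop, pvEv, pvOd, pvTrace]
  | cons d rest ih =>
    intro i s r v q
    simp only [part2loop, pvChain_eq, pvEv_cons, pvOd]
    by_cases hi : i % 2 = 1
    · have hi1 : (i + 1) % 2 ≠ 1 := by omega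
      simp only [hi, beq_iff_eq, if_pos, ih, if_neg hi1, PySem.Set.mem_add,
        pvTrace, List.mem_cons]
      tauto
    · have hi1 : (i + 1) % 2 = 1 := by omega
      simp only [beq_iff_eq, hi, if_false, ih, hi1, if_true, PySem.Set.mem_add,
        pvTrace, List.mem_cons]
      tauto

theorem part2loop_nodup (cs : List Char) :
    ∀ (i : Nat) (s r : Int × Int) (v : PySem.Set (Int × Int)),
      v.Nodup → (part2loop cs i s r v).Nodup := by
  induction cs with
  | nil => intro _ _ _ v h; exact h
  | cons d rest ih => intro i s r v h; exact ih _ _ _ _ (PySem.Set.nodup_add _ _ h)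

theorem pvRange_succ_left (n : Nat) : List.range (n + 1) = 0 :: (List.range n).map (· + 1) := by
  rw [List.range_eq_range', List.range'_succ, List.range_eq_range']
  simp [List.range'_eq_map_range]
  omega

theorem pvEv_filterMap {α : Type} (xs : List α) :
    List.filterMap (fun k => xs[2 * k]?) (List.range ((xs.length + 1) / 2)) = pvEv xs := by
  induction xs using pvEv.induct with
  | case1 => simp [pvEv]
  | case2 x => simp [pvEv]
  | case3 x y r ih =>
    have hc : ((x :: y :: r).length + 1) / 2 = (r.length + 1) / 2 + 1 := by simp; omega
    rw [hc, pvRange_succ_left]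
    simp only [List.filterMap_cons, List.filterMap_map]
    simp only [Nat.mul_zero, List.getElem?_cons_zero, pvEv]
    rw [show ((fun k => (x :: y :: r)[2 * k]?) ∘ (· + 1)) = fun k => r[2 * k]? from by
      funext k; simp [Nat.mul_add]]
    rw [ih]

-- the even slice xs[0::2] is pvEv
theorem pvSlice_ev {α : Type} (xs : List α) :
    PySem.List.slice? xs (some 0) none 2 = some (pvEv xs) := by
  simp only [PySem.List.slice?, PySem.List.sliceIndices]
  norm_num
  rw [show (if 0 < xs.length then (((xs.length : Int) + 2 - 1) / 2).toNat else 0)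
        = (xs.length + 1) / 2 from by split <;> omega]
  rw [← pvEv_filterMap xs]
  rw [show (fun x : Nat => xs[(2 * (x : Int)).toNat]?) = (fun k : Nat => xs[2 * k]?) from
    funext fun k => by rw [show (2 * (k : Int)).toNat = 2 * k from by omega]]

-- the odd slice xs[1::2] is pvOd
theorem pvSlice_od {α : Type} (xs : List α) :
    PySem.List.slice? xs (some 1) none 2 = some (pvOd xs) := by
  simp only [PySem.List.slice?, PySem.List.sliceIndices]
  rcases xs with _ | ⟨a, rest⟩
  · simp [pvOd]
  · simp only [pvOd]
    norm_num
    rw [show (if 0 < rest.length then (((rest.length : Int) + 2 - 1) / 2).toNat else 0)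
          = (rest.length + 1) / 2 from by split <;> omega]
    rw [show (fun x : Nat => (a :: rest)[(1 + 2 * (x : Int)).toNat]?) = (fun k : Nat => rest[2 * k]?) from
      funext fun k => by rw [show (1 + 2 * (k : Int)).toNat = 2 * k + 1 from by omega]; simp]
    exact pvEv_filterMap rest

-- bridge: the two string slices of port B, as lists
theorem pvStrSlice_ev (s : String) :
    ((PySem.Str.slice? s (some 0) none 2).getD "").toList = pvEv s.toList := by
  simp only [PySem.Str.slice?, PySem.Chars.slice?_eq_listSlice?, pvSlice_ev,
    Option.map_some, Option.getD_some, String.toList_ofList]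

theorem pvStrSlice_od (s : String) :
    ((PySem.Str.slice? s (some 1) none 2).getD "").toList = pvOd s.toList := by
  simp only [PySem.Str.slice?, PySem.Chars.slice?_eq_listSlice?, pvSlice_od,
    Option.map_some, Option.getD_some, String.toList_ofList]

-- ===== VERDICT (by name: the statement is the Claim_ definition above) =====
theorem part2_spec : Claim_equal_part2 := by
  intro directions _
  show part2 directions = part2_alt directions
  simp only [part2, part2_alt, pvStrSlice_ev, pvStrSlice_od, PySem.Set.len]
  congr 1
  have hA := part2loop_nodup directions.toList 0 ((0 : Int), (0 : Int)) ((0 : Int), (0 : Int))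
    (PySem.Set.ofList [((0 : Int), (0 : Int))]) (PySem.Set.nodup_ofList _)
  have hB := part2walk_nodup (pvOd directions.toList) 0 0
    (part2walk (pvEv directions.toList) 0 0 (PySem.Set.ofList [((0 : Int), (0 : Int))]))
    (part2walk_nodup (pvEv directions.toList) 0 0 (PySem.Set.ofList [((0 : Int), (0 : Int))])
      (PySem.Set.nodup_ofList _))
  refine List.Perm.length_eq ((List.perm_ext_iff_of_nodup hA hB).mpr ?_)
  intro q
  rw [part2loop_mem, part2walk_mem, part2walk_mem]
  norm_num
  tauto
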